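-- pv_equiv track=rewrite | github.com/asigalov61/tegridymidi | tegridymidi/misc.py | escore_notes_to_parsons_code
-- ===== SOURCE A (Python) =====
-- def escore_notes_to_parsons_code(escore_notes,
--                                  times_index=1,
--                                  pitches_index=4,
--                                  return_as_list=False
--                                  ):
--
--   parsons = "*"
--   parsons_list = []
--
--   prev = ['note', -1, -1, -1, -1, -1, -1]
--
--   for e in escore_notes:
--     if e[times_index] != prev[times_index]:
--
--       if e[pitches_index] > prev[pitches_index]:
--           parsons += "U"
--           parsons_list.append(1)
--
--       elif e[pitches_index] < prev[pitches_index]: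
--           parsons += "D"
--           parsons_list.append(-1)
--
--       elif e[pitches_index] == prev[pitches_index]:
--           parsons += "R"
--           parsons_list.append(0)
--
--       prev = e
--
--   if return_as_list:
--     return parsons_list
--
--   else:
--     return parsons
-- ===== SOURCE B (Python) =====
-- def escore_notes_to_parsons_code(escore_notes,
--                                  times_index=1,
--                                  pitches_index=4,
--                                  return_as_list=False
--                                  ):
--     # pass 1: reduced pitch contour (one pitch per distinct consecutive time),
--     # seeded with the sentinel time/pitch -1
--     pitches = [-1]
--     last_time = -1
--     for e in escore_notes:
--         t = e[times_index]
--         if t != last_time: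
--             pitches.append(e[pitches_index])
--             last_time = t
--
--     # pass 2: compare consecutive pitches
--     if return_as_list:
--         return [(a < b) - (a > b) for a, b in zip(pitches, pitches[1:])]
--     return '*' + ''.join('U' if b > a else 'D' if b < a else 'R'
--                          for a, b in zip(pitches, pitches[1:]))
-- ===== Notes on version B (the rewrite author's own statement) =====
-- stated objective: alternative
-- what changed: Replaces A's single stateful loop carrying a whole previous-note row and a growing string with two separate passes (a scan reducing the notes to a sentinel-seeded pitch contour list, then a zip over consecutive contour pairs emitting U/D/R); the Lean claim is stated under Pre_, which excludes return_as_list=True because there A returns a Python list, not a value of the declared str return type (B implements the list mode identically in Python, but it cannot be stated as a String equivalence), and excludes indices that hit A's string sentinel slot or raise.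
-- outside the precondition, e.g. on escore_notes_to_parsons_code([[3, 5]], 1, 1, True): A returns [1], B returns [1]; on escore_notes_to_parsons_code([[0, 60], [1, 62]], 1, 1, True): A returns [1, 1], B returns [1, 1]; on escore_notes_to_parsons_code([[-1, 5]], 0, 1, False): A returns '*U', B returns '*'
import Mathlib
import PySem

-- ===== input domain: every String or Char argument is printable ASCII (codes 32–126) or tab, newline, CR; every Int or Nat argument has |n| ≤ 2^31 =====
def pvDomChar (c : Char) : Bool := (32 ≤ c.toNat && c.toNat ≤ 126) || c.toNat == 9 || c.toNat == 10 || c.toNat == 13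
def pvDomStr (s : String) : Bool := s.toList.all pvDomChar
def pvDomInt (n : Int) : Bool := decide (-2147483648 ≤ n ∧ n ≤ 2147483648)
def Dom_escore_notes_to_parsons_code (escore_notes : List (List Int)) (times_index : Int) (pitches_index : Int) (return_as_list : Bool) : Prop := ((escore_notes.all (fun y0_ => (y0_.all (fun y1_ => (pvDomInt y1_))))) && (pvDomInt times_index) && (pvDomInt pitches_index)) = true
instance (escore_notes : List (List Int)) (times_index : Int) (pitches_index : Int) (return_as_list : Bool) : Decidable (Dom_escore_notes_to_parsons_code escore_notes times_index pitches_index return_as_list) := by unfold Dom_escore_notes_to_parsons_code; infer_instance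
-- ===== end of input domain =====

-- B replaces A's single stateful loop (whole previous row + growing string) by two passes:
-- a scan reducing the notes to a sentinel-seeded pitch-contour list, then a pairwise pass
-- emitting U/D/R.  Same cost, different decomposition.  Note on Pre_: with
-- return_as_list = True, Python A returns a LIST — not a value of the declared str return
-- type this String-valued equivalence is about — so Pre_ declares that mode excluded
-- (Source B implements it identically in Python); see the Pre_ comment below.

-- ===== PORT A =====
-- A's loop: state (parsons chars, parsons_list, prev row); the string accumulator is
-- carried as List Char and wrapped with String.mk at return (Lean's String.append is opaque).
def pvLoopA (t p : Int) : List (List Int) → List Char × List Int × List Int → List Char × List Int × List Int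
  | [], st => st
  | e :: rest, (parsons, plist, prev) =>
    if (PySem.List.pyGet? e t).getD 0 ≠ (PySem.List.pyGet? prev t).getD 0 then
      if (PySem.List.pyGet? e p).getD 0 > (PySem.List.pyGet? prev p).getD 0 then
        pvLoopA t p rest (parsons ++ ['U'], plist ++ [1], e)
      else if (PySem.List.pyGet? e p).getD 0 < (PySem.List.pyGet? prev p).getD 0 then
        pvLoopA t p rest (parsons ++ ['D'], plist ++ [-1], e)
      else
        pvLoopA t p rest (parsons ++ ['R'], plist ++ [0], e)
    else pvLoopA t p rest (parsons, plist, prev)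

-- A's sentinel row is ['note',-1,-1,-1,-1,-1,-1]; the string 'note' at slot 0 is not an Int,
-- so slot 0 holds -1 here and Pre_ excludes indices resolving to slot 0 (0 and -7).
def escore_notes_to_parsons_code (escore_notes : List (List Int)) (times_index : Int) (pitches_index : Int) (return_as_list : Bool) : String :=
  let st := pvLoopA times_index pitches_index escore_notes (['*'], [], [-1, -1, -1, -1, -1, -1, -1])
  if return_as_list then "" else String.mk st.1   -- Python returns a list (not a str) here; excluded by Pre_

-- ===== PORT B =====
-- pass 1 of Source B: reduced pitch contour, one pitch per distinct consecutive time
def pvContour (t p : Int) : List (List Int) → Int → List Int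
  | [], _ => []
  | e :: rest, lastT =>
    if (PySem.List.pyGet? e t).getD 0 ≠ lastT then
      (PySem.List.pyGet? e p).getD 0 :: pvContour t p rest ((PySem.List.pyGet? e t).getD 0)
    else pvContour t p rest lastT

-- pass 2 of Source B: zip(pitches, pitches[1:]) comparisons
def pvSteps : List Int → List Char
  | a :: b :: rest => (if b > a then 'U' else if b < a then 'D' else 'R') :: pvSteps (b :: rest)
  | _ => []

def escore_notes_to_parsons_code_alt (escore_notes : List (List Int)) (times_index : Int) (pitches_index : Int) (return_as_list : Bool) : String :=
  let pitches := -1 :: pvContour times_index pitches_index escore_notes (-1)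
  if return_as_list then "" else String.mk ('*' :: pvSteps pitches)

-- ===== PRECONDITION & SPEC =====
-- Pre_ EXCLUDES, and says so here explicitly: (1) return_as_list = True, on which A returns
-- a Python LIST — a value outside the declared str return type, so no String equivalence can
-- be stated about it (Source B reproduces A's list output there in Python); (2) indices resolving
-- to sentinel slot 0 (0 or -7), where A compares an int against the string 'note' — an
-- artefact of A's sentinel row; (3) other out-of-range indices, where A raises IndexError.
def Pre_escore_notes_to_parsons_code (escore_notes : List (List Int)) (times_index : Int) (pitches_index : Int) (return_as_list : Bool) : Prop :=
  return_as_list = false ∧ ∀ e ∈ escore_notes,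
    PySem.Raise.InRange e.length times_index ∧ PySem.Raise.InRange e.length pitches_index ∧
    PySem.Raise.InRange 7 times_index ∧ times_index ≠ 0 ∧ times_index ≠ -7 ∧
    PySem.Raise.InRange 7 pitches_index ∧ pitches_index ≠ 0 ∧ pitches_index ≠ -7
instance (escore_notes : List (List Int)) (times_index : Int) (pitches_index : Int) (return_as_list : Bool) : Decidable (Pre_escore_notes_to_parsons_code escore_notes times_index pitches_index return_as_list) := by unfold Pre_escore_notes_to_parsons_code; infer_instance

def pvWitness_escore_notes_to_parsons_code : List (List Int) × Int × Int × Bool :=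
  ([[0, 60], [1, 62], [2, 62]], 1, 1, false)

def Spec_escore_notes_to_parsons_code (escore_notes : List (List Int)) (times_index : Int) (pitches_index : Int) (return_as_list : Bool) (out : String) : Prop := out = escore_notes_to_parsons_code_alt escore_notes times_index pitches_index return_as_list
instance (escore_notes : List (List Int)) (times_index : Int) (pitches_index : Int) (return_as_list : Bool) (out : String) : Decidable (Spec_escore_notes_to_parsons_code escore_notes times_index pitches_index return_as_list out) := by unfold Spec_escore_notes_to_parsons_code; infer_instance

-- ===== CLAIM (what is proved, stated in full; the proofs are below) =====
def Claim_equal_escore_notes_to_parsons_code : Prop := ∀ (escore_notes : List (List Int)) (times_index : Int) (pitches_index : Int) (return_as_list : Bool), Dom_escore_notes_to_parsons_code escore_notes times_index pitches_index return_as_list → Pre_escore_notes_to_parsons_code escore_notes times_index pitches_index return_as_list → Spec_escore_notes_to_parsons_code escore_notes times_index pitches_index return_as_list (escore_notes_to_parsons_code escore_notes times_index pitches_index return_as_list)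

-- ===== LEMMAS AND PROOFS =====

-- invariant: A's loop from state (s, l, prev) appends exactly B's steps over the contour
-- seeded with prev's time/pitch entries
lemma pvLoopA_eq (t p : Int) (rest : List (List Int)) :
    ∀ (s : List Char) (l : List Int) (prev : List Int),
    (pvLoopA t p rest (s, l, prev)).1
      = s ++ pvSteps ((PySem.List.pyGet? prev p).getD 0
            :: pvContour t p rest ((PySem.List.pyGet? prev t).getD 0)) := by
  induction rest with
  | nil => intro s l prev; simp [pvLoopA, pvContour, pvSteps]
  | cons e rest ih =>
    intro s l prev
    by_cases ht : (PySem.List.pyGet? e t).getD 0 = (PySem.List.pyGet? prev t).getD 0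
    · simp [pvLoopA, pvContour, ht, ih]
    · rcases lt_trichotomy ((PySem.List.pyGet? prev p).getD 0) ((PySem.List.pyGet? e p).getD 0)
        with hp | hp | hp
      · simp [pvLoopA, pvContour, pvSteps, ht, hp, ih, not_lt.mpr hp.le, List.append_assoc]
      · simp [pvLoopA, pvContour, pvSteps, ht, hp, ih, List.append_assoc]
      · simp [pvLoopA, pvContour, pvSteps, ht, hp, ih, not_lt.mpr hp.le, List.append_assoc]

-- every in-range index of the sentinel row reads -1
lemma sentinel_get (i : Int) (h : PySem.Raise.InRange 7 i) :
    (PySem.List.pyGet? ([-1, -1, -1, -1, -1, -1, -1] : List Int) i).getD 0 = -1 := by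
  rcases h with ⟨h1, h2⟩
  interval_cases i <;> decide

-- ===== VERDICT (by name: the statement is the Claim_ definition above) =====
theorem escore_notes_to_parsons_code_spec : Claim_equal_escore_notes_to_parsons_code := by
  intro es t p rl _ hpre
  obtain ⟨hrl, hrows⟩ := hpre
  subst hrl
  unfold Spec_escore_notes_to_parsons_code escore_notes_to_parsons_code escore_notes_to_parsons_code_alt
  simp only [Bool.false_eq_true, if_false]
  cases es with
  | nil => simp [pvLoopA, pvContour, pvSteps]
  | cons e rest =>
    obtain ⟨_, _, h7t, _, _, h7p, _, _⟩ := hrows e (List.mem_cons_self ..)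
    rw [pvLoopA_eq, sentinel_get _ h7t, sentinel_get _ h7p]
    rfl
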